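-- pv_equiv track=rewrite | github.com/FletcherFrimpong/sigma | cve_monitor.py | extract_crowdstrike_rule
-- ===== SOURCE A (Python) =====
-- def extract_crowdstrike_rule(content):
--     """Extract CrowdStrike rule from AI response"""
--     # Look for CrowdStrike-specific content
--     lines = content.split('\n')
--     falcon_lines = []
--     in_falcon = False
--
--     for line in lines:
--         if 'crowdstrike' in line.lower() or 'falcon' in line.lower():
--             in_falcon = True
--         if in_falcon:
--             falcon_lines.append(line)
--         if in_falcon and line.strip() == '':
--             break
--
--     return '\n'.join(falcon_lines) if falcon_lines else None
-- ===== SOURCE B (Python) =====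
-- def extract_crowdstrike_rule(content):
--     """Extract CrowdStrike rule from AI response"""
--     # Group the lines into blank-line-terminated paragraphs, then search the
--     # paragraphs for the first marker line and return that paragraph's tail.
--     chunks = []
--     cur = []
--     for line in content.split('\n'):
--         cur.append(line)
--         if line.strip() == '':
--             chunks.append(cur)
--             cur = []
--     if cur:
--         chunks.append(cur)
--     for chunk in chunks:
--         for k, line in enumerate(chunk):
--             if 'crowdstrike' in line.lower() or 'falcon' in line.lower():
--                 return '\n'.join(chunk[k:])
--     return None
-- ===== Notes on version B (the rewrite author's own statement) =====
-- stated objective: alternative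
-- what changed: Instead of A's single scan threading an in_falcon flag through every line, B first builds a paragraph structure (a list of blank-line-terminated groups of lines) and then searches that structure for the first paragraph containing a marker line, returning that paragraph from the marker line on.
import Mathlib
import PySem

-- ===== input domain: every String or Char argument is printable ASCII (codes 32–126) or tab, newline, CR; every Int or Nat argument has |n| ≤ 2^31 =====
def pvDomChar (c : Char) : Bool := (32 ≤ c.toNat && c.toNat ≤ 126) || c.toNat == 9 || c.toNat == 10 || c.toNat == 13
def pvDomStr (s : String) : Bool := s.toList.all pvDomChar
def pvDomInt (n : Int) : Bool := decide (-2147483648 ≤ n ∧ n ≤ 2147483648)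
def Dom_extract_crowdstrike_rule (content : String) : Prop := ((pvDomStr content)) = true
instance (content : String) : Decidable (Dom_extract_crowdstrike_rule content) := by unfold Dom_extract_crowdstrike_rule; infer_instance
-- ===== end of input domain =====

-- B groups the lines into blank-line-terminated paragraphs first and then searches that
-- paragraph structure, instead of A's flag-threaded single scan (objective: simpler decomposition).
-- ===== PORT A =====
def pvMatch (l : String) : Bool :=
  PySem.Str.isIn "crowdstrike" (PySem.Str.lower l) || PySem.Str.isIn "falcon" (PySem.Str.lower l)

def pvLoopA : List String → List String → Bool → List String
  | [], acc, _ => acc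
  | l :: rest, acc, inFalcon =>
    let inFalcon := if pvMatch l then true else inFalcon
    let acc := if inFalcon then acc ++ [l] else acc
    if inFalcon && (PySem.Str.strip l == "") then acc
    else pvLoopA rest acc inFalcon

def extract_crowdstrike_rule (content : String) : Option String :=
  let lines := (PySem.Str.split? content "\n").getD []
  let falcon_lines := pvLoopA lines [] false
  if falcon_lines.isEmpty then none else some (PySem.Str.join "\n" falcon_lines)

-- ===== PORT B =====
-- grouping pass: each blank line (strip == "") closes the current paragraph and belongs to it
def pvChunkGo : List String → List String → List (List String)
  | [], cur => if cur.isEmpty then [] else [cur]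
  | l :: rest, cur =>
    if PySem.Str.strip l == "" then (cur ++ [l]) :: pvChunkGo rest []
    else pvChunkGo rest (cur ++ [l])

-- inner search of one paragraph: first marker line, return the paragraph from there on
def pvSearchChunk (c : List String) : Option String :=
  match List.findIdx? (fun l => pvMatch l) c with
  | none => none
  | some k => some (PySem.Str.join "\n" (List.drop k c))

def pvSearchChunks : List (List String) → Option String
  | [] => none
  | c :: cs =>
    match pvSearchChunk c with
    | some s => some s
    | none => pvSearchChunks cs

def extract_crowdstrike_rule_alt (content : String) : Option String :=
  pvSearchChunks (pvChunkGo ((PySem.Str.split? content "\n").getD []) [])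

-- ===== PRECONDITION & SPEC =====
def Spec_extract_crowdstrike_rule (content : String) (out : Option String) : Prop := out = extract_crowdstrike_rule_alt content
instance (content : String) (out : Option String) : Decidable (Spec_extract_crowdstrike_rule content out) := by unfold Spec_extract_crowdstrike_rule; infer_instance

-- ===== CLAIM (what is proved, stated in full; the proofs are below) =====
def Claim_equal_extract_crowdstrike_rule : Prop := ∀ (content : String), Dom_extract_crowdstrike_rule content → Spec_extract_crowdstrike_rule content (extract_crowdstrike_rule content)

-- ===== LEMMAS AND PROOFS =====
-- the value A's loop computes once the flag is set: take lines up to and including the first blank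
def pvCollectB : List String → List String
  | [] => []
  | l :: rest => l :: (if PySem.Str.strip l == "" then [] else pvCollectB rest)

theorem pvLoopA_true (lines : List String) : ∀ acc, pvLoopA lines acc true = acc ++ pvCollectB lines := by
  induction lines with
  | nil => intro acc; simp [pvLoopA, pvCollectB]
  | cons l rest ih =>
    intro acc
    simp only [pvLoopA, pvCollectB]
    have h1 : (if pvMatch l then true else true) = true := by cases pvMatch l <;> rfl
    rw [h1]
    by_cases hb : (PySem.Str.strip l == "") = true
    · simp [hb]
    · simp only [Bool.true_and, hb, if_neg, Bool.false_eq_true, not_false_eq_true, if_pos, ih]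
      simp

theorem pvLoopA_start (lines : List String) :
    (let fl := pvLoopA lines [] false
     if fl.isEmpty then none else some (PySem.Str.join "\n" fl)) =
    (match List.findIdx? (fun l => pvMatch l) lines with
     | none => none
     | some i => some (PySem.Str.join "\n" (pvCollectB (List.drop i lines)))) := by
  induction lines with
  | nil => simp [pvLoopA]
  | cons l rest ih =>
    by_cases hm : pvMatch l = true
    · have hA : pvLoopA (l :: rest) [] false = pvCollectB (l :: rest) := by
        simp only [pvLoopA, hm, if_pos, Bool.true_and, pvCollectB]
        by_cases hb : (PySem.Str.strip l == "") = true
        · simp [hb]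
        · simp [hb, pvLoopA_true]
      simp [hA, List.findIdx?_cons, hm, pvCollectB]
    · have hm' : pvMatch l = false := Bool.eq_false_iff.mpr hm
      have hA : pvLoopA (l :: rest) [] false = pvLoopA rest [] false := by
        simp [pvLoopA, hm']
      simp only [hA, List.findIdx?_cons, hm', Bool.false_eq_true, if_neg, not_false_eq_true]
      rw [ih]
      cases h : rest.findIdx? (fun l => pvMatch l) <;> simp

theorem pvCollectB_noblank (c : List String) (h : ∀ x ∈ c, (PySem.Str.strip x == "") = false) :
    pvCollectB c = c := by
  induction c with
  | nil => rfl
  | cons l rest ih =>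
    have hl := h l (List.mem_cons_self ..)
    simp only [pvCollectB, hl, Bool.false_eq_true, if_neg, not_false_eq_true]
    rw [ih (fun x hx => h x (List.mem_cons_of_mem _ hx))]

theorem pvCollectB_append_blank (c : List String) (l : String) (rest : List String)
    (h : ∀ x ∈ c, (PySem.Str.strip x == "") = false) (hl : (PySem.Str.strip l == "") = true) :
    pvCollectB (c ++ l :: rest) = c ++ [l] := by
  induction c with
  | nil => simp [pvCollectB, hl]
  | cons x xs ih =>
    have hx := h x (List.mem_cons_self ..)
    simp only [List.cons_append, pvCollectB, hx, Bool.false_eq_true, if_neg, not_false_eq_true]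
    rw [ih (fun y hy => h y (List.mem_cons_of_mem _ hy))]

theorem pvChunks_formula (lines : List String) :
    ∀ cur : List String, (∀ x ∈ cur, (PySem.Str.strip x == "") = false) →
    pvSearchChunks (pvChunkGo lines cur) =
      (match List.findIdx? (fun l => pvMatch l) (cur ++ lines) with
       | none => none
       | some i => some (PySem.Str.join "\n" (pvCollectB (List.drop i (cur ++ lines))))) := by
  induction lines with
  | nil =>
    intro cur hcur
    cases cur with
    | nil => simp [pvChunkGo, pvSearchChunks]
    | cons x xs =>
      simp only [pvChunkGo, List.isEmpty_cons, Bool.false_eq_true, if_neg, not_false_eq_true,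
        pvSearchChunks, pvSearchChunk, List.append_nil]
      cases h : List.findIdx? (fun l => pvMatch l) (x :: xs) with
      | none => rfl
      | some k =>
        have hsub : ∀ y ∈ List.drop k (x :: xs), (PySem.Str.strip y == "") = false :=
          fun y hy => hcur y (List.mem_of_mem_drop hy)
        dsimp only
        rw [pvCollectB_noblank _ hsub]
  | cons l rest ih =>
    intro cur hcur
    by_cases hb : (PySem.Str.strip l == "") = true
    · -- l is blank: current paragraph is closed as cur ++ [l]
      simp only [pvChunkGo, hb, if_pos, pvSearchChunks, pvSearchChunk]
      have hsplit : cur ++ l :: rest = (cur ++ [l]) ++ rest := by simp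
      rw [hsplit]
      cases h : List.findIdx? (fun l => pvMatch l) (cur ++ [l]) with
      | some k =>
        have hfr : List.findIdx? (fun l => pvMatch l) ((cur ++ [l]) ++ rest) = some k := by
          rw [List.findIdx?_append, h]; rfl
        rw [hfr]
        have hk : k < (cur ++ [l]).length := by
          rw [List.findIdx?_eq_some_iff_findIdx_eq] at h; omega
        have hk' : k ≤ cur.length := by simp at hk; omega
        have hdrop : List.drop k ((cur ++ [l]) ++ rest) = List.drop k cur ++ l :: rest := by
          rw [List.append_assoc, List.drop_append_of_le_length hk']; simp
        have hdrop2 : List.drop k (cur ++ [l]) = List.drop k cur ++ [l] := by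
          rw [List.drop_append_of_le_length hk']
        dsimp only
        rw [hdrop, pvCollectB_append_blank _ _ _
          (fun y hy => hcur y (List.mem_of_mem_drop hy)) hb, hdrop2]
      | none =>
        have hfr : List.findIdx? (fun l => pvMatch l) ((cur ++ [l]) ++ rest) =
            Option.map (fun i => i + (cur ++ [l]).length) (List.findIdx? (fun l => pvMatch l) rest) := by
          rw [List.findIdx?_append, h, Option.none_or]
        rw [hfr]
        dsimp only
        rw [ih [] (by simp)]
        cases h2 : List.findIdx? (fun l => pvMatch l) rest with
        | none => simp [h2]
        | some j =>
          simp only [Option.map_some, List.nil_append]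
          have hdj : List.drop (j + (cur ++ [l]).length) ((cur ++ [l]) ++ rest) = List.drop j rest := by
            rw [List.drop_append]
            have h1 : (j + (cur ++ [l]).length) - (cur ++ [l]).length = j := by omega
            have h2 : List.drop (j + (cur ++ [l]).length) (cur ++ [l]) = [] := by
              apply List.drop_eq_nil_of_le; omega
            rw [h1, h2, List.nil_append]
          rw [hdj, h2]
    · -- l is not blank: it joins the current paragraph
      have hb' : (PySem.Str.strip l == "") = false := Bool.eq_false_iff.mpr hb
      simp only [pvChunkGo, hb', Bool.false_eq_true, if_neg, not_false_eq_true]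
      rw [ih (cur ++ [l]) (by
        intro y hy
        rcases List.mem_append.mp hy with h1 | h1
        · exact hcur y h1
        · simp at h1; subst h1; exact hb')]
      have : (cur ++ [l]) ++ rest = cur ++ l :: rest := by simp
      rw [this]

-- ===== VERDICT (by name: the statement is the Claim_ definition above) =====
theorem extract_crowdstrike_rule_spec : Claim_equal_extract_crowdstrike_rule := by
  intro content _
  unfold Spec_extract_crowdstrike_rule extract_crowdstrike_rule extract_crowdstrike_rule_alt
  rw [pvChunks_formula _ [] (by simp)]
  simpa using pvLoopA_start ((PySem.Str.split? content "\n").getD [])
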